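-- pv_equiv track=rewrite | github.com/Mobiles-en-Perspective/mobiles-en-perspective-jeu-de-cartes | src/impression_cartes.py | parse_bold_segments_multiline
-- ===== SOURCE A (Python) =====
-- def parse_bold_segments_multiline(lines):
--     # lines: liste de lignes (word-wrappées)
--     # Retourne une liste de listes de segments (texte, is_bold) pour chaque ligne
--     segments_per_line = []
--     bold_open = False
--     for line in lines:
--         segs = []
--         i = 0
--         buf = ''
--         while i < len(line):
--             if line[i:i+2] == '**':
--                 if buf:
--                     segs.append((buf, bold_open))
--                     buf = ''
--                 bold_open = not bold_open
--                 i += 2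
--             else:
--                 buf += line[i]
--                 i += 1
--         if buf or not segs:
--             segs.append((buf, bold_open))
--         segments_per_line.append(segs)
--     return segments_per_line
-- ===== SOURCE B (Python) =====
-- def parse_bold_segments_multiline(lines):
--     # Split each line on '**' and walk the parts: every delimiter toggles the
--     # persistent bold flag; empty inner parts emit nothing; the last part is
--     # emitted if non-empty or if the line produced no segments yet.
--     segments_per_line = []
--     bold_open = False
--     for line in lines:
--         parts = line.split('**')
--         segs = []
--         for part in parts[:-1]:
--             if part:
--                 segs.append((part, bold_open))
--             bold_open = not bold_open
--         last = parts[-1]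
--         if last or not segs:
--             segs.append((last, bold_open))
--         segments_per_line.append(segs)
--     return segments_per_line
-- ===== Notes on version B (the rewrite author's own statement) =====
-- stated objective: idiomatic
-- what changed: B replaces A's index-based character scan with buffer accumulation by splitting each line on '**' and folding over the parts (toggle the persistent bold flag per delimiter, skip empty inner parts, keep A's final tie-breaker for the last part).
import Mathlib
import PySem

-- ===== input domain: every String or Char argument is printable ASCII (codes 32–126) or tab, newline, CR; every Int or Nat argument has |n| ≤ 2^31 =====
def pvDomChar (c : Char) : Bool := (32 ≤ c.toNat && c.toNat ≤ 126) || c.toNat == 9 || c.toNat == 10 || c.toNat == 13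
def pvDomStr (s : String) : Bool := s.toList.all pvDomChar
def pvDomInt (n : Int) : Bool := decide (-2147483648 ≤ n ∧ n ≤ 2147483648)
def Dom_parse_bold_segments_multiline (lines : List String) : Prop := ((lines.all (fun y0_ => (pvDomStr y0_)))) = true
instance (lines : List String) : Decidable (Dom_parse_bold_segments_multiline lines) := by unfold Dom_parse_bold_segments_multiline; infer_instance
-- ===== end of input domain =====

-- B replaces A's character-by-character scanner with a split-on-'**' pass over the parts (idiomatic decomposition; same cost).


-- ===== PORT A =====
-- A's inner while loop over the remaining characters; 'line[i:i+2] == "**"' is the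
-- two-char slice test '(remaining).take 2 = ['*','*']'; 'i += 2' drops both stars.
def pvScanA : List Char → List Char → List (String × Bool) → Bool → List (String × Bool) × Bool
  | [], buf, segs, bold =>
      (if buf ≠ [] ∨ segs = [] then segs ++ [(String.ofList buf, bold)] else segs, bold)
  | c :: rest, buf, segs, bold =>
      if (c :: rest).take 2 = ['*', '*'] then
        pvScanA (rest.drop 1) [] (if buf ≠ [] then segs ++ [(String.ofList buf, bold)] else segs) (!bold)
      else
        pvScanA rest (buf ++ [c]) segs bold
termination_by l => l.length
decreasing_by all_goals (simp; try omega)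

def parse_bold_segments_multiline (lines : List String) : List (List (String × Bool)) :=
  (lines.foldl (fun (st : List (List (String × Bool)) × Bool) line =>
      let r := pvScanA line.toList [] [] st.2
      (st.1 ++ [r.1], r.2)) ([], false)).1

-- ===== PORT B =====
-- B's per-line body: line.split('**') is PySem.Chars.splitOn (sep ≠ ""), then the
-- loop over parts[:-1] (toggling on every delimiter) and the final part.
def pvAltLine (line : List Char) (bold : Bool) : List (String × Bool) × Bool :=
  let parts := PySem.Chars.splitOn line ['*', '*']
  let st := parts.dropLast.foldl
      (fun (st : List (String × Bool) × Bool) part =>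
        ((if part ≠ [] then st.1 ++ [(String.ofList part, st.2)] else st.1), !st.2)) ([], bold)
  let last := parts.getLastD []
  ((if last ≠ [] ∨ st.1 = [] then st.1 ++ [(String.ofList last, st.2)] else st.1), st.2)

def parse_bold_segments_multiline_alt (lines : List String) : List (List (String × Bool)) :=
  (lines.foldl (fun (st : List (List (String × Bool)) × Bool) line =>
      let r := pvAltLine line.toList st.2
      (st.1 ++ [r.1], r.2)) ([], false)).1

-- ===== PRECONDITION & SPEC =====
def Spec_parse_bold_segments_multiline (lines : List String) (out : List (List (String × Bool))) : Prop := out = parse_bold_segments_multiline_alt lines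
instance (lines : List String) (out : List (List (String × Bool))) : Decidable (Spec_parse_bold_segments_multiline lines out) := by unfold Spec_parse_bold_segments_multiline; infer_instance

-- ===== CLAIM (what is proved, stated in full; the proofs are below) =====
def Claim_equal_parse_bold_segments_multiline : Prop := ∀ (lines : List String), Dom_parse_bold_segments_multiline lines → Spec_parse_bold_segments_multiline lines (parse_bold_segments_multiline lines)

-- ===== LEMMAS AND PROOFS =====

-- recursive specification of splitting on '**'
def pvSplit2 : List Char → List (List Char)
  | [] => [[]]
  | c :: rest =>
      if (c :: rest).take 2 = ['*', '*'] then
        [] :: pvSplit2 (rest.drop 1)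
      else
        match pvSplit2 rest with
        | p :: ps => (c :: p) :: ps
        | [] => [[c]]
termination_by l => l.length
decreasing_by all_goals (simp; try omega)

theorem pvSplit2_ne_nil (l : List Char) : pvSplit2 l ≠ [] := by
  fun_induction pvSplit2 l <;> simp_all

-- prepend onto the head part
def pvConsHead (x : List Char) : List (List Char) → List (List Char)
  | p :: ps => (x ++ p) :: ps
  | [] => [x]

theorem pvSplitOn_go_eq (fuel : Nat) (l cur : List Char) (acc : List (List Char))
    (h : l.length < fuel) :
    PySem.Chars.splitOn.go ['*', '*'] fuel l cur acc
      = acc.reverse ++ pvConsHead cur.reverse (pvSplit2 l) := by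
  induction fuel generalizing l cur acc with
  | zero => omega
  | succ n ih =>
    match l with
    | [] => simp [PySem.Chars.splitOn.go, pvSplit2, pvConsHead]
    | c :: rest =>
      by_cases hp : (c :: rest).take 2 = ['*', '*']
      · match rest, hp with
        | c2 :: t, hp =>
          obtain ⟨rfl, rfl⟩ : c = '*' ∧ c2 = '*' := by simpa using hp
          rcases hq : pvSplit2 t with _ | ⟨p, ps⟩
          · exact absurd hq (pvSplit2_ne_nil _)
          · simp only [PySem.Chars.splitOn.go, List.isPrefixOf, beq_self_eq_true,
              Bool.true_and, if_true, List.length_cons, List.length_nil, List.drop_succ_cons, List.drop_zero]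
            rw [ih t [] (cur.reverse :: acc) (by simp at h; omega)]
            simp [pvSplit2, hq, pvConsHead]
      · have hpf : List.isPrefixOf ['*', '*'] (c :: rest) = false := by
          by_contra hb
          simp only [Bool.not_eq_false] at hb
          obtain ⟨u, hu⟩ := List.isPrefixOf_iff_prefix.mp hb
          simp only [List.cons_append, List.nil_append] at hu
          injection hu with h1 hu'
          subst h1; subst hu'
          exact hp (by simp)
        have hp' : ¬(c = '*' ∧ List.take 1 rest = ['*']) := by simpa using hp
        rcases hq : pvSplit2 rest with _ | ⟨p, ps⟩
        · exact absurd hq (pvSplit2_ne_nil _)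
        · simp only [PySem.Chars.splitOn.go, hpf, Bool.false_eq_true, if_false]
          rw [ih rest (c :: cur) acc (by simp at h; omega)]
          simp [pvSplit2, hp', hq, pvConsHead]

theorem pvSplitOn_eq (l : List Char) :
    PySem.Chars.splitOn l ['*', '*'] = pvSplit2 l := by
  have h := pvSplitOn_go_eq (l.length + 1) l [] [] (by omega)
  rcases hq : pvSplit2 l with _ | ⟨p, ps⟩
  · exact absurd hq (pvSplit2_ne_nil l)
  · simpa [PySem.Chars.splitOn, hq, pvConsHead] using h

-- B's per-parts loop, written structurally (non-overlapping patterns)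
def pvProcB : List (List Char) → List (String × Bool) → Bool → List (String × Bool) × Bool
  | [], segs, bold => (segs, bold)
  | [last], segs, bold =>
      (if last ≠ [] ∨ segs = [] then segs ++ [(String.ofList last, bold)] else segs, bold)
  | part :: next :: parts, segs, bold =>
      pvProcB (next :: parts)
        (if part ≠ [] then segs ++ [(String.ofList part, bold)] else segs) (!bold)

theorem pvScanA_eq_procB (l : List Char) : ∀ (buf : List Char) (segs : List (String × Bool)) (bold : Bool),
    pvScanA l buf segs bold = pvProcB (pvConsHead buf (pvSplit2 l)) segs bold := by
  induction l using pvSplit2.induct with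
  | case1 =>
    intro buf segs bold
    simp [pvScanA, pvSplit2, pvConsHead, pvProcB]
  | case2 c rest hp ih =>
    intro buf segs bold
    have hp' : c = '*' ∧ List.take 1 rest = ['*'] := by simpa using hp
    rcases hq : pvSplit2 (rest.drop 1) with _ | ⟨p, ps⟩
    · exact absurd hq (pvSplit2_ne_nil _)
    · rw [hq] at ih
      simp only [List.drop_one] at ih hq
      simp [pvScanA, pvSplit2, hp', hq, pvConsHead, pvProcB, ih]
  | case3 c rest hp p ps hq ih =>
    intro buf segs bold
    have hp' : ¬(c = '*' ∧ List.take 1 rest = ['*']) := by simpa using hp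
    rw [hq] at ih
    simp [pvScanA, pvSplit2, hp', hq, pvConsHead, ih]
  | case4 c rest hp hq =>
    exact absurd hq (pvSplit2_ne_nil _)

theorem pvProcB_eq_fold (parts : List (List Char)) : ∀ (segs : List (String × Bool)) (bold : Bool),
    parts ≠ [] →
    pvProcB parts segs bold =
      (let st := parts.dropLast.foldl
          (fun (st : List (String × Bool) × Bool) part =>
            ((if part ≠ [] then st.1 ++ [(String.ofList part, st.2)] else st.1), !st.2)) (segs, bold)
       let last := parts.getLastD []
       ((if last ≠ [] ∨ st.1 = [] then st.1 ++ [(String.ofList last, st.2)] else st.1), st.2)) := by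
  induction parts with
  | nil => intro _ _ h; exact absurd rfl h
  | cons p rest ih =>
    intro segs bold _
    cases rest with
    | nil => simp [pvProcB]
    | cons q r =>
      rw [pvProcB]
      rw [ih _ _ (by simp)]
      simp

theorem pvAltLine_eq_scanA (line : List Char) (bold : Bool) :
    pvAltLine line bold = pvScanA line [] [] bold := by
  have h1 := pvScanA_eq_procB line [] [] bold
  have h2 := pvProcB_eq_fold (pvSplit2 line) [] bold (pvSplit2_ne_nil line)
  rcases hq : pvSplit2 line with _ | ⟨p, ps⟩
  · exact absurd hq (pvSplit2_ne_nil line)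
  · rw [hq] at h2
    simp only [pvAltLine, pvSplitOn_eq, hq]
    rw [h1, hq]
    simp only [pvConsHead, List.nil_append]
    exact h2.symm

-- ===== VERDICT (by name: the statement is the Claim_ definition above) =====
theorem parse_bold_segments_multiline_spec : Claim_equal_parse_bold_segments_multiline := by
  intro lines _
  unfold Spec_parse_bold_segments_multiline parse_bold_segments_multiline parse_bold_segments_multiline_alt
  have hf : (fun (st : List (List (String × Bool)) × Bool) (line : String) =>
        let r := pvAltLine line.toList st.2
        (st.1 ++ [r.1], r.2))
      = (fun (st : List (List (String × Bool)) × Bool) (line : String) =>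
        let r := pvScanA line.toList [] [] st.2
        (st.1 ++ [r.1], r.2)) := by
    funext st line
    simp [pvAltLine_eq_scanA]
  rw [hf]
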